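-- pv_equiv track=rewrite | github.com/bighog300/artio-mine-bot | app/db/crud.py | _default_identifiers_for_page_type
-- ===== SOURCE A (Python) =====
-- def _default_identifiers_for_page_type(page_type_key: str) -> list[str]:
--     key = (page_type_key or "").lower()
--     if "event" in key:
--         return ["/events/", "/event/"]
--     if any(token in key for token in ("artist", "profile", "person")):
--         return ["/artists/", "/people/"]
--     if any(token in key for token in ("venue", "gallery", "location")):
--         return ["/venues/", "/locations/", "/galleries/"]
--     if "exhibition" in key:
--         return ["/exhibitions/"]
--     if "artwork" in key:
--         return ["/artworks/", "/works/"]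
--     if "listing" in key or "directory" in key:
--         return ["/", "/index", "/list"]
--     return ["/"]
-- ===== SOURCE B (Python) =====
-- # B: one left-to-right positional sweep over the key, matching all tokens at each
-- # offset and keeping the smallest (highest-priority) category seen, instead of
-- # A's ordered chain of full substring searches.
-- _TOKEN_CATEGORY = (
--     ("event", 0),
--     ("artist", 1), ("profile", 1), ("person", 1),
--     ("venue", 2), ("gallery", 2), ("location", 2),
--     ("exhibition", 3),
--     ("artwork", 4),
--     ("listing", 5), ("directory", 5),
-- )
-- _RESULTS = (
--     ["/events/", "/event/"],
--     ["/artists/", "/people/"],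
--     ["/venues/", "/locations/", "/galleries/"],
--     ["/exhibitions/"],
--     ["/artworks/", "/works/"],
--     ["/", "/index", "/list"],
--     ["/"],
-- )
--
--
-- def _default_identifiers_for_page_type(page_type_key: str) -> list[str]:
--     key = (page_type_key or "").lower()
--     best = 6
--     for i in range(len(key)):
--         for token, cat in _TOKEN_CATEGORY:
--             if cat < best and key.startswith(token, i):
--                 best = cat
--     return list(_RESULTS[best])
-- ===== Notes on version B (the rewrite author's own statement) =====
-- stated objective: alternative
-- what changed: Instead of A's ordered chain of eleven full substring searches, B makes one left-to-right sweep over the key, matching every token at each offset and keeping the smallest (highest-priority) category, then indexes a fixed results table.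
import Mathlib
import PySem

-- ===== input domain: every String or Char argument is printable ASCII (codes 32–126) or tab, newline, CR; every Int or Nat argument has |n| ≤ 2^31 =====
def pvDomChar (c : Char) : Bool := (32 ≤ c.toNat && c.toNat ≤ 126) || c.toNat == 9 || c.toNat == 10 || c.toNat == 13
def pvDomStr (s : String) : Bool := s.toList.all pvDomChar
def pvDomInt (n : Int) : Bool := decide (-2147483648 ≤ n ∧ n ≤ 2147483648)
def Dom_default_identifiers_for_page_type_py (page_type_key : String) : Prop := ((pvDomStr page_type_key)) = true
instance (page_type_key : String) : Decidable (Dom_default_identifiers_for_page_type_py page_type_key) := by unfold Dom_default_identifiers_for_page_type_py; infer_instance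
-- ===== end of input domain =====

-- B replaces A's ordered chain of eleven full substring searches by one left-to-right
-- positional sweep that matches every token at each offset and keeps the smallest
-- (highest-priority) category seen (objective: alternative single-sweep algorithm).

-- ===== PORT A =====
def default_identifiers_for_page_type_py (page_type_key : String) : List String :=
  -- key = (page_type_key or "").lower()
  let key := PySem.Str.lower (if page_type_key == "" then "" else page_type_key)
  if PySem.Str.isIn "event" key then ["/events/", "/event/"]
  else if ["artist", "profile", "person"].any (fun token => PySem.Str.isIn token key) then
    ["/artists/", "/people/"]
  else if ["venue", "gallery", "location"].any (fun token => PySem.Str.isIn token key) then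
    ["/venues/", "/locations/", "/galleries/"]
  else if PySem.Str.isIn "exhibition" key then ["/exhibitions/"]
  else if PySem.Str.isIn "artwork" key then ["/artworks/", "/works/"]
  else if PySem.Str.isIn "listing" key || PySem.Str.isIn "directory" key then
    ["/", "/index", "/list"]
  else ["/"]

-- ===== PORT B =====
-- _TOKEN_CATEGORY (tokens kept as char lists: the sweep works position by position)
def pvTokenCategory : List (List Char × Nat) :=
  [("event".toList, 0),
   ("artist".toList, 1), ("profile".toList, 1), ("person".toList, 1),
   ("venue".toList, 2), ("gallery".toList, 2), ("location".toList, 2),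
   ("exhibition".toList, 3),
   ("artwork".toList, 4),
   ("listing".toList, 5), ("directory".toList, 5)]

-- _RESULTS[best] for best ∈ [0, 6] (the fixed 7-entry tuple, indexed by category)
def pvResults (best : Nat) : List String :=
  match best with
  | 0 => ["/events/", "/event/"]
  | 1 => ["/artists/", "/people/"]
  | 2 => ["/venues/", "/locations/", "/galleries/"]
  | 3 => ["/exhibitions/"]
  | 4 => ["/artworks/", "/works/"]
  | 5 => ["/", "/index", "/list"]
  | _ => ["/"]

def default_identifiers_for_page_type_py_alt (page_type_key : String) : List String :=
  let key := PySem.Str.lower (if page_type_key == "" then "" else page_type_key)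
  -- for i in range(len(key)): for token, cat in _TOKEN_CATEGORY:
  --   if cat < best and key.startswith(token, i): best = cat
  -- (key.startswith(token, i) with 0 ≤ i ≤ len(key) is exactly: token is a prefix of key[i:])
  let best := (List.range key.toList.length).foldl
    (fun b i => pvTokenCategory.foldl
      (fun b tc =>
        if tc.2 < b && PySem.Chars.startswith (key.toList.drop i) tc.1 then tc.2 else b) b) 6
  pvResults best

-- ===== PRECONDITION & SPEC =====
def Spec_default_identifiers_for_page_type_py (page_type_key : String) (out : List String) : Prop := out = default_identifiers_for_page_type_py_alt page_type_key
instance (page_type_key : String) (out : List String) : Decidable (Spec_default_identifiers_for_page_type_py page_type_key out) := by unfold Spec_default_identifiers_for_page_type_py; infer_instance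

-- ===== CLAIM =====
def Claim_equal_default_identifiers_for_page_type_py : Prop := ∀ (page_type_key : String), Dom_default_identifiers_for_page_type_py page_type_key → Spec_default_identifiers_for_page_type_py page_type_key (default_identifiers_for_page_type_py page_type_key)

-- ===== LEMMAS AND PROOFS =====

-- the categories the sweep matches, as a flat list (one entry per (offset, token) hit)
def pvCats (keyL : List Char) : List Nat :=
  (((List.range keyL.length).flatMap
      (fun i => pvTokenCategory.map (fun tc => (i, tc)))).filter
    (fun p => PySem.Chars.startswith (keyL.drop p.1) p.2.1)).map (fun p => p.2.2)

-- guarded-min fold = plain min fold over the filtered values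
theorem pv_foldl_guard_min {α : Type} (l : List α) (c : α → Bool) (v : α → Nat) (b : Nat) :
    l.foldl (fun b x => if c x then min b (v x) else b) b
      = ((l.filter c).map v).foldl min b := by
  induction l generalizing b with
  | nil => rfl
  | cons x xs ih =>
      by_cases h : c x = true <;> simp [h, ih]

-- the sweep's nested fold computes the minimum over pvCats (starting from 6)
theorem pv_best_eq_foldl_cats (keyL : List Char) :
    (List.range keyL.length).foldl
      (fun b i => pvTokenCategory.foldl
        (fun b tc =>
          if tc.2 < b && PySem.Chars.startswith (keyL.drop i) tc.1 then tc.2 else b) b) 6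
    = (pvCats keyL).foldl min 6 := by
  have hstep : ∀ (i b : Nat) (tc : List Char × Nat),
      (if tc.2 < b && PySem.Chars.startswith (keyL.drop i) tc.1 then tc.2 else b)
      = (if PySem.Chars.startswith (keyL.drop i) tc.1 then min b tc.2 else b) := by
    intro i b tc
    by_cases h : PySem.Chars.startswith (keyL.drop i) tc.1 = true <;>
      simp [h]
    split <;> omega
  simp only [hstep]
  unfold pvCats
  rw [List.filter_flatMap, List.map_flatMap, List.foldl_flatMap]
  congr 1
  funext b i
  simp only [List.filter_map, List.map_map, List.foldl_map, Function.comp_def,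
    pv_foldl_guard_min pvTokenCategory
        (fun tc => PySem.Chars.startswith (keyL.drop i) tc.1) (fun tc => tc.2) b]

theorem pv_foldl_min_le_init (cs : List Nat) (b : Nat) : cs.foldl min b ≤ b := by
  induction cs generalizing b with
  | nil => simp
  | cons c cs ih =>
      simp only [List.foldl_cons]
      exact le_trans (ih _) (min_le_left _ _)

theorem pv_foldl_min_le_mem (cs : List Nat) (b c : Nat) (h : c ∈ cs) :
    cs.foldl min b ≤ c := by
  induction cs generalizing b with
  | nil => cases h
  | cons d cs ih =>
      simp only [List.foldl_cons]
      rcases List.mem_cons.1 h with h | h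
      · subst h; exact le_trans (pv_foldl_min_le_init _ _) (min_le_right _ _)
      · exact ih _ h

theorem pv_foldl_min_mem (cs : List Nat) (b : Nat) :
    cs.foldl min b = b ∨ cs.foldl min b ∈ cs := by
  induction cs generalizing b with
  | nil => exact Or.inl rfl
  | cons c cs ih =>
      rcases ih (min b c) with h | h
      · simp only [List.foldl_cons, h]
        rcases min_cases b c with ⟨h', _⟩ | ⟨h', _⟩
        · exact Or.inl h'
        · exact Or.inr (by simp [h'])
      · exact Or.inr (List.mem_cons_of_mem _ h)

-- the minimum over the matched categories, written as A's priority chain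
theorem pv_min_chain (cs : List Nat) (h5 : ∀ c ∈ cs, c ≤ 5) :
    cs.foldl min 6 =
      if 0 ∈ cs then 0 else if 1 ∈ cs then 1 else if 2 ∈ cs then 2
      else if 3 ∈ cs then 3 else if 4 ∈ cs then 4 else if 5 ∈ cs then 5 else 6 := by
  have hmem := pv_foldl_min_mem cs 6
  set f := cs.foldl min 6 with hf
  have hne : ∀ c : Nat, c ≤ 5 → c ∉ cs → f ≠ c := by
    intro c hc5 hc h'
    rcases hmem with h | h
    · omega
    · exact hc (h' ▸ h)
  split_ifs with h0 h1 h2 h3 h4 h5'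
  · have := pv_foldl_min_le_mem cs 6 0 h0; omega
  · have := pv_foldl_min_le_mem cs 6 1 h1; have := hne 0 (by omega) h0; omega
  · have := pv_foldl_min_le_mem cs 6 2 h2
    have := hne 0 (by omega) h0; have := hne 1 (by omega) h1; omega
  · have := pv_foldl_min_le_mem cs 6 3 h3
    have := hne 0 (by omega) h0; have := hne 1 (by omega) h1; have := hne 2 (by omega) h2; omega
  · have := pv_foldl_min_le_mem cs 6 4 h4
    have := hne 0 (by omega) h0; have := hne 1 (by omega) h1; have := hne 2 (by omega) h2; have := hne 3 (by omega) h3; omega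
  · have := pv_foldl_min_le_mem cs 6 5 h5'
    have := hne 0 (by omega) h0; have := hne 1 (by omega) h1; have := hne 2 (by omega) h2; have := hne 3 (by omega) h3
    have := hne 4 (by omega) h4; omega
  · rcases hmem with h | h
    · omega
    · have := h5 _ h
      have := hne 0 (by omega) h0; have := hne 1 (by omega) h1; have := hne 2 (by omega) h2; have := hne 3 (by omega) h3
      have := hne 4 (by omega) h4; have := hne 5 (by omega) h5'; omega

-- membership in pvCats ⟺ some token of that category matches at some offset
theorem pv_mem_cats (keyL : List Char) (c : Nat) :
    c ∈ pvCats keyL ↔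
      ∃ i < keyL.length, ∃ tc ∈ pvTokenCategory,
        tc.2 = c ∧ PySem.Chars.startswith (keyL.drop i) tc.1 = true := by
  unfold pvCats
  simp only [List.mem_map, List.mem_filter, List.mem_flatMap, List.mem_range]
  constructor
  · rintro ⟨⟨i, tc⟩, ⟨⟨i', hi, tc', htc', heq⟩, hsw⟩, rfl⟩
    obtain ⟨h1, h2⟩ := Prod.mk.injEq .. ▸ heq
    aesop
  · rintro ⟨i, hi, tc, htc, rfl, hsw⟩
    exact ⟨(i, tc), ⟨⟨i, hi, tc, htc, rfl⟩, hsw⟩, rfl⟩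

-- ∃ offset with a prefix match ⟺ the (nonempty) token is a substring
theorem pv_exists_drop_iff_isIn (keyL tok : List Char) (hne : tok ≠ []) :
    (∃ i < keyL.length, PySem.Chars.startswith (keyL.drop i) tok = true)
      ↔ PySem.Chars.isIn tok keyL = true := by
  rw [← PySem.Chars.exists_prefix_drop_iff_isIn]
  constructor
  · rintro ⟨i, _, h⟩
    exact ⟨i, (PySem.Chars.startswith_iff _ _).1 h⟩
  · rintro ⟨j, h⟩
    by_cases hj : j < keyL.length
    · exact ⟨j, hj, (PySem.Chars.startswith_iff _ _).2 h⟩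
    · exfalso
      rw [List.drop_eq_nil_of_le (by omega)] at h
      exact hne (List.prefix_nil.1 h)

-- per-category membership rewritten over the substring tests A performs
theorem pv_cat_bool (keyL : List Char) (c : Nat) (hc : c ≤ 5) :
    decide (c ∈ pvCats keyL)
      = pvTokenCategory.any (fun tc => tc.2 == c && PySem.Chars.isIn tc.1 keyL) := by
  rw [Bool.eq_iff_iff, decide_eq_true_eq, List.any_eq_true, pv_mem_cats]
  constructor
  · rintro ⟨i, hi, tc, htc, rfl, hsw⟩
    refine ⟨tc, htc, ?_⟩
    have hne : tc.1 ≠ [] := by fin_cases htc <;> simp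
    simp [(pv_exists_drop_iff_isIn keyL tc.1 hne).1 ⟨i, hi, hsw⟩]
  · rintro ⟨tc, htc, hb⟩
    simp only [Bool.and_eq_true, beq_iff_eq] at hb
    obtain ⟨rfl, hin⟩ := hb
    have hne : tc.1 ≠ [] := by fin_cases htc <;> simp
    obtain ⟨i, hi, h⟩ := (pv_exists_drop_iff_isIn keyL tc.1 hne).2 hin
    exact ⟨i, hi, tc, htc, rfl, h⟩

theorem pv_cats_le (keyL : List Char) : ∀ c ∈ pvCats keyL, c ≤ 5 := by
  intro c hc
  obtain ⟨_, _, tc, htc, rfl, _⟩ := (pv_mem_cats keyL c).1 hc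
  fin_cases htc <;> simp

-- ===== VERDICT =====
theorem default_identifiers_for_page_type_py_spec : Claim_equal_default_identifiers_for_page_type_py := by
  intro page_type_key _
  unfold Spec_default_identifiers_for_page_type_py
  simp only [default_identifiers_for_page_type_py, default_identifiers_for_page_type_py_alt]
  set key := PySem.Str.lower (if page_type_key == "" then "" else page_type_key) with hkey
  rw [pv_best_eq_foldl_cats, pv_min_chain _ (pv_cats_le _)]
  have e0 : PySem.Str.isIn "event" key = decide ((0 : Nat) ∈ pvCats key.toList) := by
    rw [pv_cat_bool _ 0 (by omega)]
    simp [pvTokenCategory]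
  have e1 : (["artist", "profile", "person"].any (fun token => PySem.Str.isIn token key))
      = decide ((1 : Nat) ∈ pvCats key.toList) := by
    rw [pv_cat_bool _ 1 (by omega)]
    simp [pvTokenCategory]
  have e2 : (["venue", "gallery", "location"].any (fun token => PySem.Str.isIn token key))
      = decide ((2 : Nat) ∈ pvCats key.toList) := by
    rw [pv_cat_bool _ 2 (by omega)]
    simp [pvTokenCategory]
  have e3 : PySem.Str.isIn "exhibition" key = decide ((3 : Nat) ∈ pvCats key.toList) := by
    rw [pv_cat_bool _ 3 (by omega)]
    simp [pvTokenCategory]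
  have e4 : PySem.Str.isIn "artwork" key = decide ((4 : Nat) ∈ pvCats key.toList) := by
    rw [pv_cat_bool _ 4 (by omega)]
    simp [pvTokenCategory]
  have e5 : (PySem.Str.isIn "listing" key || PySem.Str.isIn "directory" key)
      = decide ((5 : Nat) ∈ pvCats key.toList) := by
    rw [pv_cat_bool _ 5 (by omega)]
    simp [pvTokenCategory]
  rw [e0, e1, e2, e3, e4, e5]
  simp only [decide_eq_true_eq]
  split_ifs <;> rfl
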